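-- pv_equiv track=rewrite | github.com/eliasdabbas/advertools | advertools/ad_from_string.py | ad_from_string
-- ===== SOURCE A (Python) =====
-- import string
--
-- def ad_from_string(s, slots=(30, 30, 30, 90, 90, 15, 15), sep=None, capitalize=False):
--     """Convert string :attr:`s` to an ad by splitting it into groups of words.
--
--     Each group would have a length of at most the allowed length for that slot.
--
--     If the total length of :attr:`s` exceeds the total allowed length, all
--     remaining characters would be grouped in the last element of the
--     returned list.
--
--     Parameters
--     ----------
--     s : str
--       A string of characters, with no restrictions on length.
--     slots : list
--       An iterable of integers for the maximum lengths for each slot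
--     sep : str
--       Character(s) by which to split :attr:`s`.
--     capitalize : bool
--       Whether or not to capitalize each word after grouping. Setting it as False would
--       not change the capitalization of the input string
--
--     Returns
--     -------
--     text_ad : list
--       A list of strings according to split spec.
--
--     Examples
--     --------
--     >>> ad_from_string('this is a short ad')
--     ['this is a short ad', '', '', '', '', '', '', '']
--
--     >>> ad_from_string('this is a longer ad and will take the first two slots')
--     ['this as a longer ad and would', 'take the first two slots',
--     '', '', '', '', '', '']
--
--     >>> ad_from_string("Slots can be changed the way you want", (10, 15, 10))
--     ['Slots can', 'be changed the', 'way you', 'want']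
--
--     >>> ad_from_string("The capitalization REMAinS as IS bY DefAULt",
--     ...                       (10, 15, 10))
--     ['The', 'capitalization', 'REMAinS as', 'IS bY DefAULt']
--
--     >>> ad_from_string("set captialize=True to capitalize first letters",
--     ...                capitalize=True)
--     ['Set Captialize=true To', 'Capitalize First Letters',
--      '', '', '', '', '', '']
--     """
--     str_words = s.split(sep=sep)
--     text_ad = ["" for x in range(len(slots) + 1)]
--     counter = 0
--
--     for i, slot in enumerate(slots):
--         while counter <= len(str_words) - 1:
--             if len(text_ad[i] + str_words[counter]) + 1 > slot:
--                 break
--             text_ad[i] += " " + str_words[counter] if text_ad[i] else str_words[counter]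
--             counter += 1
--
--     text_ad[-1] = (
--         sep.join(str_words[counter:])
--         if sep is not None
--         else " ".join(str_words[counter:])
--     )
--
--     return [string.capwords(x) if capitalize else x for x in text_ad]
-- ===== SOURCE B (Python) =====
-- import string
--
--
-- def ad_from_string(s, slots=(30, 30, 30, 90, 90, 15, 15), sep=None, capitalize=False):
--     """Single pass over the words with a moving slot pointer (same result as the
--     nested slot/word loops of the original)."""
--     words = s.split(sep=sep)
--     out = []
--     cur = ""
--     i = 0
--     rest = []
--     for k, w in enumerate(words):
--         while i < len(slots) and len(cur) + len(w) + 1 > slots[i]: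
--             out.append(cur)
--             cur = ""
--             i += 1
--         if i == len(slots):
--             rest = words[k:]
--             break
--         cur = cur + " " + w if cur else w
--     if i < len(slots):
--         out.append(cur)
--         out.extend("" for _ in range(len(slots) - i - 1))
--     out.append((" " if sep is None else sep).join(rest))
--     if capitalize:
--         out = [string.capwords(x) for x in out]
--     return out
-- ===== Notes on version B (the rewrite author's own statement) =====
-- stated objective: alternative
-- what changed: Replaced A's nested for-slot/while-words loops (shared word counter, preallocated list mutated by index) with a single pass over the word list that keeps a current-slot pointer, flushing finished slot texts as it goes and routing the leftover words to the final element.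
import Mathlib
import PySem

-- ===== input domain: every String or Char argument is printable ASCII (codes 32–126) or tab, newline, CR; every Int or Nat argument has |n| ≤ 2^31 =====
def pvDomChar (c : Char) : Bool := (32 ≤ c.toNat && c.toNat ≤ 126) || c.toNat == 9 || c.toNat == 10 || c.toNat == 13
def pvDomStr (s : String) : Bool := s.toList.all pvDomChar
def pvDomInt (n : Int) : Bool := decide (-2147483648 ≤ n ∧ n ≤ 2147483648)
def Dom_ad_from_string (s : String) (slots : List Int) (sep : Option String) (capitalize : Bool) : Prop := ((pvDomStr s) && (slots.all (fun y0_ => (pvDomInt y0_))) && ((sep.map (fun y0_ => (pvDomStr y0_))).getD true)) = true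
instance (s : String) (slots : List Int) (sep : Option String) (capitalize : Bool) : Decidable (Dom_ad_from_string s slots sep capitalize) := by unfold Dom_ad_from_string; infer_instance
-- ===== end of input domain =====

-- B replaces A's nested for-slot/while-words loops by a single pass over the words with a
-- moving slot pointer (objective: alternative decomposition, same greedy result).


-- shared helpers: both Pythons call s.split(sep=sep) and string.capwords
def pvWordsOf (s : String) (sep : Option String) : List (List Char) :=
  match sep with
  | none => PySem.Chars.split₀ s.toList
  | some t => (PySem.Chars.split? s.toList t.toList).getD []

-- string.capwords(x) = ' '.join(w.capitalize() for w in x.split()); exact on the ASCII domain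
def pvCapwords (cs : List Char) : List Char :=
  PySem.Chars.join [' ']
    ((PySem.Chars.split₀ cs).map (fun w =>
      match w with
      | [] => []
      | c :: r => PySem.Chars.upperChar c :: r.map PySem.Chars.lowerChar))

def pvJoinSep (sep : Option String) (ws : List (List Char)) : List Char :=
  PySem.Chars.join (match sep with | none => [' '] | some t => t.toList) ws

-- ===== PORT A =====
-- the inner 'while counter <= len(str_words) - 1: …' loop for one slot
def aWhile (ws : List (List Char)) (cur : List Char) (slot : Int) : List Char × List (List Char) :=
  match ws with
  | [] => (cur, [])
  | w :: rest =>
    if (cur.length + w.length + 1 : Int) > slot then (cur, w :: rest)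
    else aWhile rest (if cur.isEmpty then w else cur ++ ' ' :: w) slot

-- the outer 'for i, slot in enumerate(slots)' loop; returns the slot texts and the unconsumed words
def aSlots (slots : List Int) (ws : List (List Char)) : List (List Char) × List (List Char) :=
  match slots with
  | [] => ([], ws)
  | slot :: rest =>
    let p := aWhile ws [] slot
    let q := aSlots rest p.2
    (p.1 :: q.1, q.2)

def ad_from_string (s : String) (slots : List Int) (sep : Option String) (capitalize : Bool) : List String :=
  let str_words := pvWordsOf s sep
  let r := aSlots slots str_words
  let text_ad := r.1 ++ [pvJoinSep sep r.2]
  text_ad.map (fun x => String.ofList (if capitalize then pvCapwords x else x))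

-- ===== PORT B =====
-- the inner 'while i < len(slots) and len(cur) + len(w) + 1 > slots[i]' pointer advance:
-- returns the slot texts flushed to out and the remaining slots
def bAdvance (cur w : List Char) (slotsRem : List Int) : List (List Char) × List Int :=
  match slotsRem with
  | [] => ([], [])
  | slot :: rest =>
    if (cur.length + w.length + 1 : Int) > slot then
      let p := bAdvance [] w rest
      (cur :: p.1, p.2)
    else ([], slot :: rest)

-- the single 'for k, w in enumerate(words)' pass: returns (out, remaining slots, cur, rest)
def bWords (ws : List (List Char)) (slotsRem : List Int) (cur : List Char) :
    List (List Char) × List Int × List Char × List (List Char) :=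
  match ws with
  | [] => ([], slotsRem, cur, [])
  | w :: rest =>
    let p := bAdvance cur w slotsRem
    let cur1 := if p.1.isEmpty then cur else []
    match p.2 with
    | [] => (p.1, [], cur1, w :: rest)
    | s' :: rest' =>
      let q := bWords rest (s' :: rest') (if cur1.isEmpty then w else cur1 ++ ' ' :: w)
      (p.1 ++ q.1, q.2.1, q.2.2.1, q.2.2.2)

def ad_from_string_alt (s : String) (slots : List Int) (sep : Option String) (capitalize : Bool) : List String :=
  let words := pvWordsOf s sep
  let r := bWords words slots []
  let out := r.1 ++ (match r.2.1 with
    | [] => []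
    | _ :: restSlots => r.2.2.1 :: List.replicate restSlots.length [])
  let out2 := out ++ [pvJoinSep sep r.2.2.2]
  let out3 := if capitalize then out2.map pvCapwords else out2
  out3.map String.ofList

-- ===== PRECONDITION & SPEC =====
-- Pre_ excludes only an empty separator, on which Python's str.split raises ValueError
def Pre_ad_from_string (s : String) (slots : List Int) (sep : Option String) (capitalize : Bool) : Prop :=
  sep ≠ some ""
instance (s : String) (slots : List Int) (sep : Option String) (capitalize : Bool) : Decidable (Pre_ad_from_string s slots sep capitalize) := by unfold Pre_ad_from_string; infer_instance

def pvWitness_ad_from_string : String × List Int × Option String × Bool :=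
  ("this is a short ad", [10, 15], none, false)

def Spec_ad_from_string (s : String) (slots : List Int) (sep : Option String) (capitalize : Bool) (out : List String) : Prop := out = ad_from_string_alt s slots sep capitalize
instance (s : String) (slots : List Int) (sep : Option String) (capitalize : Bool) (out : List String) : Decidable (Spec_ad_from_string s slots sep capitalize out) := by unfold Spec_ad_from_string; infer_instance

-- ===== CLAIM (what is proved, stated in full; the proofs are below) =====
def Claim_equal_ad_from_string : Prop := ∀ (s : String) (slots : List Int) (sep : Option String) (capitalize : Bool), Dom_ad_from_string s slots sep capitalize → Pre_ad_from_string s slots sep capitalize → Spec_ad_from_string s slots sep capitalize (ad_from_string s slots sep capitalize)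

-- ===== LEMMAS AND PROOFS =====
-- the common greedy recursion both loop structures compute
def pvG : List Int → List (List Char) → List Char → List (List Char) × List (List Char)
  | [], ws, _ => ([], ws)
  | _ :: rest, [], cur => (cur :: List.replicate rest.length [], [])
  | slot :: rest, w :: ws, cur =>
    if (cur.length + w.length + 1 : Int) > slot then
      let q := pvG rest (w :: ws) []
      (cur :: q.1, q.2)
    else pvG (slot :: rest) ws (if cur.isEmpty then w else cur ++ ' ' :: w)
  termination_by sl ws _ => sl.length + ws.length

-- A's outer loop with the current slot's accumulated text made explicit
def aSlotsC (slots : List Int) (ws : List (List Char)) (cur : List Char) :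
    List (List Char) × List (List Char) :=
  match slots with
  | [] => ([], ws)
  | slot :: rest =>
    let p := aWhile ws cur slot
    let q := aSlots rest p.2
    (p.1 :: q.1, q.2)

lemma aSlotsC_nil_cur (sl : List Int) (ws : List (List Char)) :
    aSlotsC sl ws [] = aSlots sl ws := by
  cases sl <;> rfl

lemma aSlots_nil_words (sl : List Int) :
    aSlots sl [] = (List.replicate sl.length [], []) := by
  induction sl with
  | nil => rfl
  | cons s rest ih => simp [aSlots, aWhile, ih, List.replicate]

lemma aSlotsC_eq_pvG (sl : List Int) (ws : List (List Char)) (cur : List Char) :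
    aSlotsC sl ws cur = pvG sl ws cur := by
  fun_induction pvG sl ws cur with
  | case1 ws cur => rfl
  | case2 slot rest cur => simp [aSlotsC, aWhile, aSlots_nil_words]
  | case3 slot rest w ws cur h q ih =>
    show aSlotsC (slot :: rest) (w :: ws) cur
        = (cur :: (pvG rest (w :: ws) []).1, (pvG rest (w :: ws) []).2)
    rw [aSlotsC]
    rw [show aWhile (w :: ws) cur slot = (cur, w :: ws) from by rw [aWhile, if_pos h]]
    rw [← ih, aSlotsC_nil_cur]
  | case4 slot rest w ws cur h ih =>
    simp only [dite_eq_ite] at ih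
    rw [← ih, aSlotsC]
    rw [show aWhile (w :: ws) cur slot
        = aWhile ws (if cur.isEmpty then w else cur ++ ' ' :: w) slot from by
      rw [aWhile, if_neg h]]
    rw [aSlotsC]

lemma bWords_cons_nofit (w : List Char) (ws : List (List Char)) (slot : Int)
    (rest : List Int) (cur : List Char)
    (h : (cur.length + w.length + 1 : Int) > slot) :
    bWords (w :: ws) (slot :: rest) cur =
      (cur :: (bWords (w :: ws) rest []).1, (bWords (w :: ws) rest []).2) := by
  rcases hp : bAdvance [] w rest with ⟨pref, sl'⟩
  have hadv : bAdvance cur w (slot :: rest) = (cur :: pref, sl') := by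
    rw [bAdvance, if_pos h, hp]
  have hR : bWords (w :: ws) rest [] =
      match sl' with
      | [] => (pref, [], if pref.isEmpty then ([] : List Char) else [], w :: ws)
      | s' :: rest' =>
        let q := bWords ws (s' :: rest')
          (if (if pref.isEmpty then ([] : List Char) else []).isEmpty then w
           else (if pref.isEmpty then ([] : List Char) else []) ++ ' ' :: w)
        (pref ++ q.1, q.2.1, q.2.2.1, q.2.2.2) := by
    cases rest with
    | nil =>
      simp only [bAdvance] at hp
      cases hp
      rfl
    | cons a as =>
      rw [bWords]
      simp only [hp]
      cases sl' <;> rfl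
  rw [bWords, hadv, hR]
  cases sl' with
  | nil => simp
  | cons s' rest' => simp

lemma bWords_cons_fit (w : List Char) (ws : List (List Char)) (slot : Int)
    (rest : List Int) (cur : List Char)
    (h : ¬ (cur.length + w.length + 1 : Int) > slot) :
    bWords (w :: ws) (slot :: rest) cur =
      bWords ws (slot :: rest) (if cur.isEmpty then w else cur ++ ' ' :: w) := by
  rw [bWords]
  rw [show bAdvance cur w (slot :: rest) = ([], slot :: rest) from by
    rw [bAdvance, if_neg h]]
  simp

def bAssemble (r : List (List Char) × List Int × List Char × List (List Char)) :
    List (List Char) × List (List Char) :=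
  (r.1 ++ (match r.2.1 with
    | [] => []
    | _ :: restSlots => r.2.2.1 :: List.replicate restSlots.length []), r.2.2.2)

lemma bWords_eq_pvG (sl : List Int) (ws : List (List Char)) (cur : List Char) :
    bAssemble (bWords ws sl cur) = pvG sl ws cur := by
  fun_induction pvG sl ws cur with
  | case1 ws cur =>
    cases ws with
    | nil => rfl
    | cons w rest => simp [bWords, bAdvance, bAssemble]
  | case2 slot rest cur => rfl
  | case3 slot rest w ws cur h q ih =>
    show bAssemble (bWords (w :: ws) (slot :: rest) cur)
        = (cur :: (pvG rest (w :: ws) []).1, (pvG rest (w :: ws) []).2)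
    rw [bWords_cons_nofit w ws slot rest cur h, ← ih]
    simp [bAssemble]
  | case4 slot rest w ws cur h ih =>
    simp only [dite_eq_ite] at ih
    rw [bWords_cons_fit w ws slot rest cur h, ih]

-- ===== VERDICT (by name: the statement is the Claim_ definition above) =====
theorem ad_from_string_spec : Claim_equal_ad_from_string := by
  intro s slots sep capitalize _ _
  unfold Spec_ad_from_string ad_from_string ad_from_string_alt
  simp only
  rw [show aSlots slots (pvWordsOf s sep)
      = bAssemble (bWords (pvWordsOf s sep) slots []) from by
    rw [← aSlotsC_nil_cur, aSlotsC_eq_pvG, bWords_eq_pvG]]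
  cases capitalize <;> simp [bAssemble, List.map_map, Function.comp_def]
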